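-- pv_equiv track=rewrite | github.com/aaa2ppp/ya-algo-training9-pub | less3/e/main.py | solve
-- ===== SOURCE A (Python) =====
-- MOD = 1_000_000_007
--
-- def solve(a):
--     n = len(a)
--     if n < 3:
--         return 0
--
--     b = [0] * (n + 1)
--     for i, val in enumerate(a):
--         b[i + 1] = (b[i] + val) % MOD
--
--     ans = 0
--     for i in range(1, n - 1):
--         v = a[i]
--         v = (v * b[i]) % MOD
--         v = (v * ((b[n] - b[i + 1]))) % MOD
--         ans = (ans + v) % MOD
--
--     return ans
-- ===== SOURCE B (Python) =====
-- MOD = 1_000_000_007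
--
-- INV6 = 166666668  # modular inverse of 6 mod MOD (6 * 166666668 = MOD + 1)
--
--
-- def solve(a):
--     # The answer is the elementary symmetric sum e3 = sum_{i<j<k} a[i]*a[j]*a[k] mod MOD.
--     # By Newton's identities, e3 = (p1**3 - 3*p1*p2 + 2*p3) / 6 where p_k are power sums,
--     # so one pass over the data accumulating the three power sums suffices.
--     s1 = s2 = s3 = 0
--     for v in a:
--         s1 = (s1 + v) % MOD
--         s2 = (s2 + v * v) % MOD
--         s3 = (s3 + v * v * v) % MOD
--     return (s1 * s1 * s1 - 3 * s1 * s2 + 2 * s3) % MOD * INV6 % MOD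
-- ===== Notes on version B (the rewrite author's own statement) =====
-- stated objective: alternative
-- what changed: Replaces A's prefix-sum array plus index loop over middle elements with the Newton-identity closed form: one pass accumulates the power sums p1,p2,p3 mod MOD and the answer is (p1^3-3*p1*p2+2*p3)*inv(6) mod MOD, since the task computes the elementary symmetric sum e3.
import Mathlib
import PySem

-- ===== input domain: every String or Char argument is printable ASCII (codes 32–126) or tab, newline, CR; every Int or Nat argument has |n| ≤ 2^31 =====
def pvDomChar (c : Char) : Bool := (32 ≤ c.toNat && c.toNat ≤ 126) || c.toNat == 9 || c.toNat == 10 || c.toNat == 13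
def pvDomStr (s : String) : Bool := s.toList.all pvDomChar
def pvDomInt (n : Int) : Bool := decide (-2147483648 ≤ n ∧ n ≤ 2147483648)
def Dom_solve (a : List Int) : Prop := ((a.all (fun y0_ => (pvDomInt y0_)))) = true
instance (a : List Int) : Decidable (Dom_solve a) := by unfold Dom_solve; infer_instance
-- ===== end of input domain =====

-- B replaces A's prefix-sum array and middle-index loop by the Newton-identity closed
-- form e3 = (p1^3 - 3 p1 p2 + 2 p3) * inv6 over the power sums, accumulated in one pass.

-- ===== PORT A =====
-- helper for A's first loop: b[i+1] = (b[i] + val) % MOD, carrying the previous cell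
def solveMkB (prev : Int) : List Int → List Int
  | [] => []
  | v :: t =>
      let nxt := PySem.Int.mod (prev + v) 1000000007
      nxt :: solveMkB nxt t

def solve (a : List Int) : Int :=
  let n := a.length
  if n < 3 then 0
  else
    let b := 0 :: solveMkB 0 a
    (PySem.List.pyRange 1 ((n : Int) - 1) 1).foldl (fun ans i =>
      let v := PySem.List.pyGetD a i 0
      let v := PySem.Int.mod (v * PySem.List.pyGetD b i 0) 1000000007
      let v := PySem.Int.mod (v * (PySem.List.pyGetD b (n : Int) 0 - PySem.List.pyGetD b (i + 1) 0)) 1000000007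
      PySem.Int.mod (ans + v) 1000000007) 0

-- ===== PORT B =====
def solve_alt (a : List Int) : Int :=
  let s := a.foldl (fun (s : Int × Int × Int) v =>
      (PySem.Int.mod (s.1 + v) 1000000007,
       PySem.Int.mod (s.2.1 + v * v) 1000000007,
       PySem.Int.mod (s.2.2 + v * v * v) 1000000007)) (0, 0, 0)
  PySem.Int.mod (PySem.Int.mod (s.1 * s.1 * s.1 - 3 * s.1 * s.2.1 + 2 * s.2.2) 1000000007 * 166666668) 1000000007

-- ===== PRECONDITION & SPEC =====
def Spec_solve (a : List Int) (out : Int) : Prop := out = solve_alt a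
instance (a : List Int) (out : Int) : Decidable (Spec_solve a out) := by unfold Spec_solve; infer_instance

-- ===== CLAIM (what is proved, stated in full; the proofs are below) =====
def Claim_equal_solve : Prop := ∀ (a : List Int), Dom_solve a → Spec_solve a (solve a)

-- ===== LEMMAS AND PROOFS =====

theorem pymod (x : Int) : PySem.Int.mod x 1000000007 = x % 1000000007 :=
  PySem.Int.mod_eq_emod_of_pos (by norm_num)

theorem mod_idem (x m : Int) : x % m % m = x % m := Int.emod_emod_of_dvd x dvd_rfl

theorem mod_add_left (x y m : Int) : (x % m + y) % m = (x + y) % m := by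
  rw [Int.add_emod, mod_idem, ← Int.add_emod]

-- prefix sums of a, reduced mod MOD
def pfx (a : List Int) (i : Nat) : Int := ((a.take i).sum) % 1000000007

theorem pfx_zero (a : List Int) : pfx a 0 = 0 := by simp [pfx]

theorem sum_take_succ (a : List Int) (i : Nat) (h : i < a.length) :
    (a.take (i + 1)).sum = (a.take i).sum + a.getD i 0 := by
  rw [List.sum_take_succ a i h, List.getD_eq_getElem a 0 h]

theorem mkB_getD (a : List Int) : ∀ (p : Int) (i : Nat), i < a.length →
    (solveMkB p a).getD i 0 = (p + (a.take (i + 1)).sum) % 1000000007 := by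
  induction a with
  | nil => intro p i h; simp at h
  | cons v t ih =>
      intro p i h
      cases i with
      | zero => simp [solveMkB]
      | succ i =>
          simp only [solveMkB, pymod, List.getD_cons_succ]
          rw [ih _ i (by simpa using h)]
          simp only [List.take_succ_cons, List.sum_cons]
          rw [mod_add_left, add_assoc]

theorem b_getD (a : List Int) (i : Nat) (h : i ≤ a.length) :
    (0 :: solveMkB 0 a).getD i 0 = pfx a i := by
  cases i with
  | zero => simp [pfx_zero]
  | succ i =>
      rw [List.getD_cons_succ, mkB_getD a 0 i (by omega), zero_add, pfx]

-- the per-index term of A's second loop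
def TaF (a : List Int) (i : Nat) : Int :=
  ((a.getD i 0 * pfx a i) % 1000000007 * (pfx a a.length - pfx a (i + 1))) % 1000000007

-- A equals a fold of TaF over range' 1 (n-2)
theorem A_eq (a : List Int) :
    solve a = (List.range' 1 (a.length - 2)).foldl
      (fun c i => (c + TaF a i) % 1000000007) 0 := by
  unfold solve
  by_cases h3 : a.length < 3
  · simp only [if_pos h3]
    have h : a.length - 2 = 0 := by omega
    rw [h]; rfl
  · simp only [if_neg h3]
    rw [PySem.List.pyRange_one]
    have ht : (((a.length : Int) - 1) - 1).toNat = a.length - 2 := by omega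
    rw [ht, List.range'_eq_map_range, List.foldl_map, List.foldl_map]
    apply PySem.List.foldl_congr_mem
    intro acc k hk
    have hk2 : k < a.length - 2 := List.mem_range.mp hk
    have hc1 : (1 : Int) + (k : Nat) = ((1 + k : Nat) : Int) := by push_cast; ring
    have hc2 : ((1 + k : Nat) : Int) + 1 = ((k + 2 : Nat) : Int) := by push_cast; ring
    simp only [hc1, hc2, PySem.List.pyGetD_natCast, pymod]
    rw [b_getD a (1 + k) (by omega), b_getD a (k + 2) (by omega), b_getD a a.length le_rfl]
    show _ = (acc + TaF a (1 + k)) % 1000000007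
    unfold TaF
    rw [show 1 + k + 1 = k + 2 from by omega]

theorem range'_concat1 (s n : Nat) : List.range' s (n + 1) = List.range' s n ++ [s + n] := by
  induction n generalizing s with
  | zero => simp [List.range'_succ]
  | succ k ih =>
      rw [List.range'_succ, ih (s + 1), List.range'_succ]
      simp [List.cons_append]
      omega

-- fold preserves "already reduced mod MOD"
theorem fold_mod_idem (F : Nat → Int) : ∀ (l : List Nat) (c : Int), c % 1000000007 = c →
    (l.foldl (fun c i => (c + F i) % 1000000007) c) % 1000000007
      = l.foldl (fun c i => (c + F i) % 1000000007) c := by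
  intro l
  induction l with
  | nil => intro c hc; exact hc
  | cons x t ih => intro c hc; exact ih _ (mod_idem _ _)

-- cast to ZMod MOD
def cz (x : Int) : ZMod 1000000007 := (x : ZMod 1000000007)

theorem czm (x : Int) : ((x % 1000000007 : Int) : ZMod 1000000007) = (x : ZMod 1000000007) := by
  have h : ((1000000007 : Nat) : Int) = 1000000007 := by norm_num
  rw [← h, ZMod.intCast_mod]

theorem cz_mod (x : Int) : cz (x % 1000000007) = cz x := czm x

theorem cz_inj_reduced (x y : Int) (hx : x % 1000000007 = x) (hy : y % 1000000007 = y)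
    (h : cz x = cz y) : x = y := by
  have hme : x ≡ y [ZMOD (1000000007 : Nat)] := (ZMod.intCast_eq_intCast_iff x y _).mp h
  have : x % ((1000000007 : Nat) : Int) = y % ((1000000007 : Nat) : Int) := hme
  have hnn : ((1000000007 : Nat) : Int) = 1000000007 := by norm_num
  rw [hnn, hx, hy] at this
  exact this

-- cast of a list sum
theorem cz_sum (l : List Int) : cz l.sum = (l.map cz).sum := by
  induction l with
  | nil => simp [cz]
  | cons v t ih => simp only [List.sum_cons, List.map_cons, cz, Int.cast_add] at *; rw [ih]

-- cast of an accumulate-mod fold is the sum of the casts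
theorem foldl_mod_cast {α : Type} (f : α → Int) (l : List α) : ∀ (c : Int),
    cz (l.foldl (fun t v => (t + f v) % 1000000007) c) = cz c + (l.map (fun v => cz (f v))).sum := by
  induction l with
  | nil => intro c; simp
  | cons v t ih =>
      intro c
      simp only [List.foldl_cons, List.map_cons, List.sum_cons]
      rw [ih, cz_mod]
      show cz (c + f v) + _ = _
      unfold cz
      push_cast
      ring

-- B's triple fold splits into three independent folds
theorem foldl_triple (l : List Int) : ∀ (c1 c2 c3 : Int),
    l.foldl (fun (s : Int × Int × Int) v =>
      ((s.1 + v) % 1000000007, (s.2.1 + v * v) % 1000000007, (s.2.2 + v * v * v) % 1000000007))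
      (c1, c2, c3)
    = (l.foldl (fun t v => (t + v) % 1000000007) c1,
       l.foldl (fun t v => (t + v * v) % 1000000007) c2,
       l.foldl (fun t v => (t + v * v * v) % 1000000007) c3) := by
  induction l with
  | nil => intro c1 c2 c3; rfl
  | cons v t ih => intro c1 c2 c3; simp only [List.foldl_cons]; exact ih _ _ _

-- elementary symmetric sums over a list, by structural recursion
def e2sum : List (ZMod 1000000007) → ZMod 1000000007
  | [] => 0
  | v :: t => e2sum t + v * t.sum

def e3sum : List (ZMod 1000000007) → ZMod 1000000007
  | [] => 0
  | v :: t => e3sum t + v * e2sum t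

-- left-to-right weighted sum matching A's loop: element * (prefix before it) * (suffix after it)
def wsum (pre : ZMod 1000000007) : List (ZMod 1000000007) → ZMod 1000000007
  | [] => 0
  | v :: t => v * pre * t.sum + wsum (pre + v) t

theorem wsum_eq (l : List (ZMod 1000000007)) : ∀ pre, wsum pre l = pre * e2sum l + e3sum l := by
  induction l with
  | nil => intro pre; simp [wsum, e2sum, e3sum]
  | cons v t ih =>
      intro pre
      simp only [wsum, e2sum, e3sum, ih]
      ring

theorem e2sum_closed (l : List (ZMod 1000000007)) :
    2 * e2sum l = l.sum ^ 2 - (l.map (· ^ 2)).sum := by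
  induction l with
  | nil => simp [e2sum]
  | cons v t ih =>
      simp only [e2sum, List.sum_cons, List.map_cons]
      rw [mul_add, ih]
      ring

theorem e3sum_closed (l : List (ZMod 1000000007)) :
    6 * e3sum l = l.sum ^ 3 - 3 * l.sum * (l.map (· ^ 2)).sum + 2 * (l.map (· ^ 3)).sum := by
  induction l with
  | nil => simp [e3sum]
  | cons v t ih =>
      simp only [e3sum, List.sum_cons, List.map_cons]
      have h2 := e2sum_closed t
      rw [mul_add, ih]
      have : (6 : ZMod 1000000007) * (v * e2sum t) = 3 * v * (2 * e2sum t) := by ring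
      rw [this, h2]
      ring

theorem inv6_mul : (6 : ZMod 1000000007) * 166666668 = 1 := by decide

-- cz of A's per-index term, as real (unreduced) prefix sums
theorem cz_TaF (a : List Int) (i : Nat) :
    cz (TaF a i) = cz (a.getD i 0) * cz ((a.take i).sum)
      * (cz a.sum - cz ((a.take (i + 1)).sum)) := by
  unfold TaF pfx cz
  rw [List.take_length]
  push_cast [czm]
  ring

-- the mapped-range sum of A's terms is the weighted sum
theorem G_sum (a : List Int) : ∀ (l : List Int) (j : Nat), a.drop j = l →
    ((List.range' j l.length).map (fun i => cz (TaF a i))).sum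
      = wsum (cz ((a.take j).sum)) (l.map cz) := by
  intro l
  induction l with
  | nil => intro j h; rfl
  | cons v t ih =>
      intro j h
      have hj : j < a.length := by
        by_contra hge
        rw [List.drop_eq_nil_of_le (by omega)] at h
        exact List.cons_ne_nil v t h.symm
      have hv : a.getD j 0 = v := by
        have h0 : (a.drop j)[0]?.getD 0 = v := by rw [h]; rfl
        rw [List.getElem?_drop] at h0
        simpa [List.getD_eq_getElem?_getD] using h0
      have hdt : a.drop (j + 1) = t := by
        have h1 : (a.drop j).drop 1 = t := by rw [h]; rfl
        rwa [List.drop_drop] at h1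
      have hsum : a.sum = (a.take (j + 1)).sum + t.sum := by
        conv_lhs => rw [← List.take_append_drop (j + 1) a]
        rw [List.sum_append, hdt]
      simp only [List.length_cons, List.range'_succ, List.map_cons, List.sum_cons, wsum]
      rw [ih (j + 1) hdt]
      rw [cz_TaF, hv, hsum]
      have hcz : cz ((a.take (j + 1)).sum + t.sum) - cz ((a.take (j + 1)).sum) = (t.map cz).sum := by
        rw [show cz ((a.take (j + 1)).sum + t.sum) = cz ((a.take (j + 1)).sum) + cz t.sum from
              Int.cast_add _ _]
        linear_combination cz_sum t
      rw [hcz]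
      have hpre : cz ((a.take (j + 1)).sum) = cz ((a.take j).sum) + cz v := by
        rw [sum_take_succ a j hj, hv]; exact Int.cast_add _ _
      rw [hpre]

theorem cz_solve (a : List Int) : cz (solve a) = e3sum (a.map cz) := by
  rw [A_eq, show ((0:Int) = 0 % 1000000007) from rfl]
  rw [foldl_mod_cast (TaF a)]
  by_cases h3 : a.length < 3
  · match a, h3 with
    | [], _ => simp [cz, e3sum]
    | [x], _ => simp [cz, e3sum, e2sum]
    | [x, y], _ => simp [cz, e3sum, e2sum]
  · have hn : a.length = (a.length - 2) + 1 + 1 := by omega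
    have hfull : ((List.range' 0 a.length).map (fun i => cz (TaF a i))).sum
        = e3sum (a.map cz) := by
      have hg := G_sum a a 0 rfl
      simp only [List.take_zero, List.sum_nil] at hg
      rw [hg, wsum_eq]
      have : cz 0 = 0 := by simp [cz]
      rw [this]
      ring
    rw [show (List.range' 0 a.length) = 0 :: List.range' 1 (a.length - 2 + 1) from by
          rw [hn]; rfl] at hfull
    rw [range'_concat1] at hfull
    simp only [List.map_cons, List.sum_cons, List.map_append, List.sum_append,
      List.map_cons, List.map_nil, List.sum_cons, List.sum_nil] at hfull
    have hz0 : cz (TaF a 0) = 0 := by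
      rw [cz_TaF]
      simp [cz]
    have hzl : cz (TaF a (1 + (a.length - 2))) = 0 := by
      rw [cz_TaF]
      rw [show 1 + (a.length - 2) + 1 = a.length from by omega, List.take_length]
      ring
    rw [hz0, hzl] at hfull
    simpa [cz] using hfull

theorem cz_solve_alt (a : List Int) :
    cz (solve_alt a)
      = ((a.map cz).sum ^ 3 - 3 * (a.map cz).sum * ((a.map cz).map (· ^ 2)).sum
          + 2 * ((a.map cz).map (· ^ 3)).sum) * 166666668 := by
  unfold solve_alt
  simp only [pymod, foldl_triple]
  rw [cz_mod]
  have hr : ∀ (f : Int → Int), cz (a.foldl (fun t v => (t + f v) % 1000000007) 0)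
      = (a.map (fun v => cz (f v))).sum := by
    intro f
    rw [show ((0:Int) = 0 % 1000000007) from rfl, foldl_mod_cast f]
    simp [cz]
  show cz (_ * 166666668) = _
  have hmul : ∀ x : Int, cz (x * 166666668) = cz x * 166666668 := by
    intro x; unfold cz; push_cast; ring
  rw [hmul, cz_mod]
  have hexp : ∀ x y z : Int, cz (x * x * x - 3 * x * y + 2 * z)
      = cz x ^ 3 - 3 * cz x * cz y + 2 * cz z := by
    intro x y z; unfold cz; push_cast; ring
  rw [hexp, hr (fun v => v), hr (fun v => v * v), hr (fun v => v * v * v)]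
  have h1 : (a.map (fun v => cz v)).sum = (a.map cz).sum := rfl
  have h2 : (a.map (fun v => cz (v * v))).sum = ((a.map cz).map (· ^ 2)).sum := by
    rw [List.map_map]
    congr 1
    apply List.map_congr_left
    intro x _
    simp only [Function.comp_apply]
    unfold cz
    push_cast
    ring
  have h3 : (a.map (fun v => cz (v * v * v))).sum = ((a.map cz).map (· ^ 3)).sum := by
    rw [List.map_map]
    congr 1
    apply List.map_congr_left
    intro x _
    simp only [Function.comp_apply]
    unfold cz
    push_cast
    ring
  rw [h1, h2, h3]

theorem solve_reduced (a : List Int) : solve a % 1000000007 = solve a := by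
  rw [A_eq]
  exact fold_mod_idem (TaF a) _ 0 rfl

theorem solve_alt_reduced (a : List Int) : solve_alt a % 1000000007 = solve_alt a := by
  unfold solve_alt
  simp only [pymod]
  exact mod_idem _ _

-- ===== VERDICT (by name: the statement is the Claim_ definition above) =====
theorem solve_spec : Claim_equal_solve := by
  intro a _
  unfold Spec_solve
  apply cz_inj_reduced _ _ (solve_reduced a) (solve_alt_reduced a)
  rw [cz_solve, cz_solve_alt]
  have h6 := e3sum_closed (a.map cz)
  calc e3sum (a.map cz) = (166666668 : ZMod 1000000007) * (6 * e3sum (a.map cz)) := by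
        rw [← mul_assoc, mul_comm (166666668 : ZMod 1000000007) 6, inv6_mul, one_mul]
    _ = _ := by rw [h6]; ring
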